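-- pv_equiv track=rewrite | github.com/gali1998/ExtendedIntroToCSHomework | 5/hw5_207704842.py | prefix_suffix_overlap_hash2
-- ===== SOURCE A (Python) =====
-- def prefix_suffix_overlap_hash2(lst, k):
--     result = []
--     d = {}
--
--     for i in range(len(lst)):
--         key = lst[i][:k]
--
--         if key in d:
--             d[key].append(i)
--         else:
--             d[key] = [i]
--
--     for i in range(len(lst)):
--         suffix = lst[i][-k:]
--
--         if suffix in d:
--             for j in range(len(d[suffix])):
--                 if d[suffix][j] != i:
--                     result.append((d[suffix][j], i))
--     return result
-- ===== SOURCE B (Python) =====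
-- def prefix_suffix_overlap_hash2(lst, k):
--     result = []
--     for i in range(len(lst)):
--         suffix = lst[i][-k:]
--         for j in range(len(lst)):
--             if j != i and lst[j][:k] == suffix:
--                 result.append((j, i))
--     return result
-- ===== Notes on version B (the rewrite author's own statement) =====
-- stated objective: simpler
-- what changed: Replaces the prefix-grouping dict and its two-phase build/lookup with a direct all-pairs double loop that compares lst[j][:k] to lst[i][-k:] and appends (j, i) in the same order.
import Mathlib
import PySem

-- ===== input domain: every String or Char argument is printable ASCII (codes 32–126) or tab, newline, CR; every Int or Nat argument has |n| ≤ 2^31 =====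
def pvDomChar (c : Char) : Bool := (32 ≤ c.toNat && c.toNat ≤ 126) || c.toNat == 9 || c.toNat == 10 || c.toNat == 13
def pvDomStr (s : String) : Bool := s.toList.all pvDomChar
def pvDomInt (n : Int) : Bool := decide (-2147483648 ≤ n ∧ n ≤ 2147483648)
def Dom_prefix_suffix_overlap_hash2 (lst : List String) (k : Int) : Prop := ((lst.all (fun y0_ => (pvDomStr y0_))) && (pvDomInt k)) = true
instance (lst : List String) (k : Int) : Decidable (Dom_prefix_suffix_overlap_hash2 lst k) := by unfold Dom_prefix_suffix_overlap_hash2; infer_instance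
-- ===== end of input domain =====

-- B replaces A's prefix-grouping dict with a direct all-pairs double loop emitting pairs in the same order (simpler; not faster).


-- ===== PORT A =====
-- Literal port of A: first loop groups indices by the k-prefix in an insertion-ordered
-- dict, second loop looks up each k-suffix and emits (j, i) for every grouped j ≠ i.
def prefix_suffix_overlap_hash2 (lst : List String) (k : Int) : List (Int × Int) :=
  let d : PySem.Dict String (List Int) :=
    (PySem.List.enumerate lst).foldl (fun d p =>
      let key := PySem.Str.slice p.2 none (some k)
      if d.contains key then d.modify key [] (fun js => js ++ [p.1])
      else d.insert key [p.1]) PySem.Dict.empty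
  (PySem.List.enumerate lst).foldl (fun result p =>
    let suffix := PySem.Str.slice p.2 (some (-k)) none
    if d.contains suffix then
      (d.getD suffix []).foldl (fun r j => if j != p.1 then r ++ [(j, p.1)] else r) result
    else result) []

-- ===== PORT B =====
-- Port of B: plain all-pairs double loop, no dict.
def prefix_suffix_overlap_hash2_alt (lst : List String) (k : Int) : List (Int × Int) :=
  (PySem.List.enumerate lst).foldl (fun result p =>
    let suffix := PySem.Str.slice p.2 (some (-k)) none
    (PySem.List.enumerate lst).foldl (fun r q =>
      if q.1 != p.1 && (PySem.Str.slice q.2 none (some k) == suffix) then r ++ [(q.1, p.1)]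
      else r) result) []

-- ===== PRECONDITION & SPEC =====
def Spec_prefix_suffix_overlap_hash2 (lst : List String) (k : Int) (out : List (Int × Int)) : Prop := out = prefix_suffix_overlap_hash2_alt lst k
instance (lst : List String) (k : Int) (out : List (Int × Int)) : Decidable (Spec_prefix_suffix_overlap_hash2 lst k out) := by unfold Spec_prefix_suffix_overlap_hash2; infer_instance

-- ===== CLAIM (what is proved, stated in full; the proofs are below) =====
def Claim_equal_prefix_suffix_overlap_hash2 : Prop := ∀ (lst : List String) (k : Int), Dom_prefix_suffix_overlap_hash2 lst k → Spec_prefix_suffix_overlap_hash2 lst k (prefix_suffix_overlap_hash2 lst k)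

-- ===== LEMMAS AND PROOFS =====


-- A's if/else dict-update step is exactly Dict.modify.
lemma pv_stepA_eq_modify (k : Int) :
    (fun (d : PySem.Dict String (List Int)) (p : Int × String) =>
      let key := PySem.Str.slice p.2 none (some k)
      if d.contains key then d.modify key [] (fun js => js ++ [p.1])
      else d.insert key [p.1])
    = fun d p => d.modify (PySem.Str.slice p.2 none (some k)) [] (fun js => js ++ [p.1]) := by
  funext d p
  by_cases h : d.contains (PySem.Str.slice p.2 none (some k)) = true
  · simp [h]
  · simp only [Bool.not_eq_true] at h
    simp [h, PySem.Dict.modify, PySem.Dict.getD_of_not_contains _ _ h]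

-- The built dict maps c to the ascending list of indices whose k-prefix is c.
lemma pv_dictA_getD (lst : List String) (k : Int) (c : String) :
    ((PySem.List.enumerate lst).foldl
        (fun d p => d.modify (PySem.Str.slice p.2 none (some k)) [] (fun js => js ++ [p.1]))
        PySem.Dict.empty).getD c []
    = ((PySem.List.enumerate lst).filter
        (fun p => PySem.Str.slice p.2 none (some k) == c)).map (·.1) := by
  have h := PySem.Dict.getD_foldl_modify_append
      ((PySem.List.enumerate lst).map (fun p => (PySem.Str.slice p.2 none (some k), p.1)))
      (PySem.Dict.empty) c
  simpa [List.foldl_map, List.filter_map, List.map_map, Function.comp] using h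

-- ===== VERDICT =====
theorem prefix_suffix_overlap_hash2_spec : Claim_equal_prefix_suffix_overlap_hash2 := by
  intro lst k _
  unfold Spec_prefix_suffix_overlap_hash2
  simp only [prefix_suffix_overlap_hash2, prefix_suffix_overlap_hash2_alt]
  rw [pv_stepA_eq_modify]
  set d := (PySem.List.enumerate lst).foldl
      (fun d p => d.modify (PySem.Str.slice p.2 none (some k)) [] (fun js => js ++ [p.1]))
      PySem.Dict.empty with hd
  have hstep : (fun (result : List (Int × Int)) (p : Int × String) =>
      let suffix := PySem.Str.slice p.2 (some (-k)) none
      if d.contains suffix then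
        (d.getD suffix []).foldl (fun r j => if j != p.1 then r ++ [(j, p.1)] else r) result
      else result)
      = fun result p =>
        let suffix := PySem.Str.slice p.2 (some (-k)) none
        (PySem.List.enumerate lst).foldl (fun r q =>
          if q.1 != p.1 && (PySem.Str.slice q.2 none (some k) == suffix) then r ++ [(q.1, p.1)]
          else r) result := by
    funext res p
    simp only []
    rw [PySem.List.foldl_append_if
        (fun q : Int × String => q.1 != p.1 && (PySem.Str.slice q.2 none (some k) == PySem.Str.slice p.2 (some (-k)) none))
        (fun q : Int × String => (q.1, p.1))]
    by_cases h : d.contains (PySem.Str.slice p.2 (some (-k)) none) = true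
    · simp only [h, if_true]
      rw [hd, pv_dictA_getD,
          PySem.List.foldl_append_if (fun j : Int => j != p.1) (fun j : Int => (j, p.1))]
      congr 1
      rw [List.filter_map, List.map_map, ← List.filter_filter]
      rfl
    · simp only [Bool.not_eq_true] at h
      simp only [h, Bool.false_eq_true, if_false]
      have hget : d.getD (PySem.Str.slice p.2 (some (-k)) none) [] = [] :=
        PySem.Dict.getD_of_not_contains _ _ h
      rw [hd, pv_dictA_getD] at hget
      have hfil : ((PySem.List.enumerate lst).filter
          (fun q => PySem.Str.slice q.2 none (some k) == PySem.Str.slice p.2 (some (-k)) none)) = [] :=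
        List.map_eq_nil_iff.mp hget
      rw [← List.filter_filter, hfil]
      simp
  rw [hstep]
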